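-- pv_equiv track=rewrite | github.com/chimd715/AlgorithmStudy | Programmers/level2/fine_square.py | solution
-- ===== SOURCE A (Python) =====
-- def solution(w, h):
--     def _find_gcd(a, b):
--         _gcd = 1
--         for _i in range(2, min(a, b) + 1):
--             if a % _i == 0 and b % _i == 0:
--                 _gcd = max(_gcd, _i)
--         return _gcd
--
--     gcd = _find_gcd(w, h)
--     small_rect_w = w // gcd
--     small_rect_h = h // gcd
--     small_spoiled_rect_count = small_rect_h + small_rect_w - 1
--     return w * h - small_spoiled_rect_count * gcd
-- ===== SOURCE B (Python) =====
-- def solution(w, h):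
--     if w >= 2 and h >= 2:
--         a, b = w, h
--         while b:
--             a, b = b, a % b
--         g = a
--     else:
--         g = 1  # no candidate divisor >= 2 exists below min(w, h)+1
--     return w * h - (w // g + h // g - 1) * g
-- ===== Notes on version B (the rewrite author's own statement) =====
-- stated objective: faster
-- what changed: Replaces the inner gcd's brute-force divisor scan over range(2, min(w,h)+1) with the Euclidean remainder loop (guarded by min(w,h) >= 2, the only case where the scan can find a divisor), keeping the final tile arithmetic identical.
import Mathlib
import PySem

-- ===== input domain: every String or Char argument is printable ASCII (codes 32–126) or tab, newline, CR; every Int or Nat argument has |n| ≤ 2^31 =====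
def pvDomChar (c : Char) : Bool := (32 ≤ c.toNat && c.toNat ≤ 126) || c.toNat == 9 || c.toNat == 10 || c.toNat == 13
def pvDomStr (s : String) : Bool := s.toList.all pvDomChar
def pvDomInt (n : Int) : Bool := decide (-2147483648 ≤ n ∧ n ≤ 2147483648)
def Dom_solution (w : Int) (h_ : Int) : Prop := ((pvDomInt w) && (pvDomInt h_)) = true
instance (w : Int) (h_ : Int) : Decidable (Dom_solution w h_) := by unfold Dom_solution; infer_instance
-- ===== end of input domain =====

-- B replaces A's O(min(w,h)) divisor scan by the Euclidean remainder loop (guarded by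
-- min(w,h) ≥ 2, the only case where A's scan can find a divisor); same final arithmetic.

-- ===== PORT A =====
-- A's inner _find_gcd: brute-force scan of range(2, min(a, b) + 1)
def pvFindGcd (a b : Int) : Int :=
  (PySem.List.pyRange 2 (min a b + 1) 1).foldl
    (fun g i => if PySem.Int.mod a i = 0 ∧ PySem.Int.mod b i = 0 then max g i else g) 1

def solution (w : Int) (h_ : Int) : Int :=
  let gcd := pvFindGcd w h_
  let small_rect_w := PySem.Int.floordiv w gcd
  let small_rect_h := PySem.Int.floordiv h_ gcd
  let small_spoiled_rect_count := small_rect_h + small_rect_w - 1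
  w * h_ - small_spoiled_rect_count * gcd

-- ===== PORT B =====
-- termination measure for the Euclidean loop: |a % b| < |b| when b ≠ 0
theorem pvModAbsLt (a b : Int) (hb : b ≠ 0) :
    (PySem.Int.mod a b).natAbs < b.natAbs := by
  rcases lt_or_gt_of_ne hb with h | h
  · have := PySem.Int.mod_neg_bounds (a := a) (b := b) h
    omega
  · have h1 := PySem.Int.mod_nonneg (a := a) (b := b) h
    have h2 := PySem.Int.mod_lt (a := a) (b := b) h
    omega

-- B's while loop: while b: a, b = b, a % b
def pvEuclid (a b : Int) : Int :=
  if hb : b = 0 then a else pvEuclid b (PySem.Int.mod a b)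
termination_by b.natAbs
decreasing_by exact pvModAbsLt a b hb

def solution_alt (w : Int) (h_ : Int) : Int :=
  let g := if 2 ≤ w ∧ 2 ≤ h_ then pvEuclid w h_ else 1
  w * h_ - (PySem.Int.floordiv w g + PySem.Int.floordiv h_ g - 1) * g

-- ===== PRECONDITION & SPEC =====
def Spec_solution (w : Int) (h_ : Int) (out : Int) : Prop := out = solution_alt w h_
instance (w : Int) (h_ : Int) (out : Int) : Decidable (Spec_solution w h_ out) := by unfold Spec_solution; infer_instance

-- ===== CLAIM (what is proved, stated in full; the proofs are below) =====
def Claim_equal_solution : Prop := ∀ (w : Int) (h_ : Int), Dom_solution w h_ → Spec_solution w h_ (solution w h_)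

-- ===== LEMMAS AND PROOFS =====

-- Euclid computes Int.gcd on nonnegative inputs
theorem pvEuclid_eq_gcd (a b : Int) (ha : 0 ≤ a) (hb : 0 ≤ b) :
    pvEuclid a b = (Int.gcd a b : Int) := by
  by_cases h0 : b = 0
  · subst h0
    rw [pvEuclid]
    simp [Int.gcd]
    exact (abs_of_nonneg ha).symm
  · have hbpos : 0 < b := by omega
    have hm := PySem.Int.mod_eq_emod_of_pos (a := a) (b := b) hbpos
    rw [pvEuclid, dif_neg h0,
      pvEuclid_eq_gcd b (PySem.Int.mod a b) hb (by rw [hm]; exact Int.emod_nonneg a h0)]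
    rw [hm]
    norm_cast
    rw [Int.gcd_comm b (a % b), Int.gcd_emod]
termination_by b.natAbs
decreasing_by exact pvModAbsLt a b h0

-- fold invariant for A's scan
theorem pvScan_invariant (w h_ : Int) :
    ∀ (l : List Int) (acc : Int), acc ∣ w → acc ∣ h_ →
      (l.foldl (fun g i => if PySem.Int.mod w i = 0 ∧ PySem.Int.mod h_ i = 0 then max g i else g) acc) ∣ w ∧
      (l.foldl (fun g i => if PySem.Int.mod w i = 0 ∧ PySem.Int.mod h_ i = 0 then max g i else g) acc) ∣ h_ ∧
      acc ≤ (l.foldl (fun g i => if PySem.Int.mod w i = 0 ∧ PySem.Int.mod h_ i = 0 then max g i else g) acc) ∧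
      (∀ i ∈ l, i ∣ w → i ∣ h_ → i ≤ (l.foldl (fun g i => if PySem.Int.mod w i = 0 ∧ PySem.Int.mod h_ i = 0 then max g i else g) acc)) := by
  intro l
  induction l with
  | nil => intro acc hw hh; exact ⟨hw, hh, le_refl _, by simp⟩
  | cons x t ih =>
    intro acc hw hh
    simp only [List.foldl_cons]
    by_cases hx : PySem.Int.mod w x = 0 ∧ PySem.Int.mod h_ x = 0
    · have hxw : x ∣ w := (PySem.Int.mod_eq_zero_iff_dvd w x).mp hx.1
      have hxh : x ∣ h_ := (PySem.Int.mod_eq_zero_iff_dvd h_ x).mp hx.2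
      rw [if_pos hx]
      have hmw : max acc x ∣ w := by rcases max_choice acc x with hm | hm <;> simp [hm, hw, hxw]
      have hmh : max acc x ∣ h_ := by rcases max_choice acc x with hm | hm <;> simp [hm, hh, hxh]
      obtain ⟨r1, r2, r3, r4⟩ := ih (max acc x) hmw hmh
      refine ⟨r1, r2, le_trans (le_max_left _ _) r3, ?_⟩
      intro i hi hiw hih
      rcases List.mem_cons.mp hi with rfl | hi
      · exact le_trans (le_max_right _ _) r3
      · exact r4 i hi hiw hih
    · rw [if_neg hx]
      obtain ⟨r1, r2, r3, r4⟩ := ih acc hw hh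
      refine ⟨r1, r2, r3, ?_⟩
      intro i hi hiw hih
      rcases List.mem_cons.mp hi with rfl | hi
      · exact absurd ⟨(PySem.Int.mod_eq_zero_iff_dvd w i).mpr hiw,
          (PySem.Int.mod_eq_zero_iff_dvd h_ i).mpr hih⟩ hx
      · exact r4 i hi hiw hih

-- A's scan equals Int.gcd when both sides are ≥ 2
theorem pvFindGcd_eq_gcd (w h_ : Int) (hw : 2 ≤ w) (hh : 2 ≤ h_) :
    pvFindGcd w h_ = (Int.gcd w h_ : Int) := by
  unfold pvFindGcd
  obtain ⟨r1, r2, r3, r4⟩ := pvScan_invariant w h_ (PySem.List.pyRange 2 (min w h_ + 1) 1) 1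
    (one_dvd _) (one_dvd _)
  set r := (PySem.List.pyRange 2 (min w h_ + 1) 1).foldl
    (fun g i => if PySem.Int.mod w i = 0 ∧ PySem.Int.mod h_ i = 0 then max g i else g) 1 with hr
  have hg : (0:Int) < Int.gcd w h_ := by
    have : Int.gcd w h_ ≠ 0 := by
      simp [Int.gcd_eq_zero_iff]; omega
    positivity
  have hrpos : (0:Int) < r := lt_of_lt_of_le one_pos r3
  have hrdvd : r ∣ (Int.gcd w h_ : Int) := Int.dvd_coe_gcd r1 r2
  have hrle : r ≤ (Int.gcd w h_ : Int) := Int.le_of_dvd hg hrdvd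
  have hgw : (Int.gcd w h_ : Int) ∣ w := Int.gcd_dvd_left w h_
  have hgh : (Int.gcd w h_ : Int) ∣ h_ := Int.gcd_dvd_right w h_
  have hgle : (Int.gcd w h_ : Int) ≤ min w h_ := by
    have h1 : (Int.gcd w h_ : Int) ≤ w := Int.le_of_dvd (by omega) hgw
    have h2 : (Int.gcd w h_ : Int) ≤ h_ := Int.le_of_dvd (by omega) hgh
    omega
  by_cases h2g : 2 ≤ (Int.gcd w h_ : Int)
  · have hmem : (Int.gcd w h_ : Int) ∈ PySem.List.pyRange 2 (min w h_ + 1) 1 := by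
      rw [PySem.List.mem_pyRange_one]; omega
    have := r4 _ hmem hgw hgh
    omega
  · omega

-- the two gcd computations agree everywhere
theorem pvGcd_agree (w h_ : Int) :
    pvFindGcd w h_ = (if 2 ≤ w ∧ 2 ≤ h_ then pvEuclid w h_ else 1) := by
  by_cases hc : 2 ≤ w ∧ 2 ≤ h_
  · rw [if_pos hc, pvFindGcd_eq_gcd w h_ hc.1 hc.2,
      pvEuclid_eq_gcd w h_ (by omega) (by omega)]
  · rw [if_neg hc]
    have : min w h_ + 1 ≤ 2 := by omega
    unfold pvFindGcd
    rw [PySem.List.pyRange_one_eq_nil this]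
    rfl

-- ===== VERDICT (by name: the statement is the Claim_ definition above) =====
theorem solution_spec : Claim_equal_solution := by
  intro w h_ _
  unfold Spec_solution solution solution_alt
  rw [pvGcd_agree w h_]
  ring
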